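-- pv_equiv track=rewrite | github.com/s-ranveer/MaRePReL | multiagent_envs/collect_and_build/collect_and_build_methods.py | collect_and_build_task_aggregator
-- ===== SOURCE A (Python) =====
-- def collect_and_build_task_aggregator(tasks):
--     """
--     This method aggregates the different tasks for the collect and build domain. The aggregation is done based on the
--     building they are building
--     """
--     # For each building, we would calculate the number of times different resources are collected
--     building_resources = {}
--     collect_tasks_found = False
--     for task in tasks:
--         if task[0] == "collect":
--             collect_tasks_found = True
--             resource_type = task[1]
--             building = task[2]
--             if building not in building_resources.keys():
--                 building_resources[building] = {resource_type: 1}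
--             else:
--                 if resource_type not in building_resources[building].keys():
--                     building_resources[building][resource_type] = 1
--                 else:
--                     building_resources[building][resource_type] += 1
--
--     # The way the planner works, build tasks for each type of building are always going to be present
--     if collect_tasks_found:
--         aggregated_tasks = []
--         for building in building_resources.keys():
--             while any(building_resources[building].values()):
--                 task = []
--                 for resource_type, count in building_resources[building].items():
--                     if count > 0:
--                         task.append(("collect", resource_type, building))
--                         building_resources[building][resource_type] -= 1
--
--                 # Append the build task to the task list
--                 task.append(("build", building))
--                 aggregated_tasks.append(task)
--
--     # If no collect tasks are found, we don't need to aggregate the tasks as the build tasks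
--     # are already present in the task list and can't be aggregated with other build tasks
--     else:
--         aggregated_tasks = []
--         for task in tasks:
--             aggregated_tasks.append([task])
--
--     # If the aggregated tasks have a length of 1 and more than one collect task, we would split the collect tasks
--     # into separate tasks
--
--     # Can remove this if the planner causes issues with the current implementation
--     if len(aggregated_tasks) == 1 and len(aggregated_tasks[0]) > 2:
--         new_aggregated_tasks = []
--         for task in aggregated_tasks[0]:
--             if task[0] == "collect":
--                 new_aggregated_tasks.append([task, ("build", task[2])])
--         aggregated_tasks = new_aggregated_tasks
--
--     return aggregated_tasks
-- ===== SOURCE B (Python) =====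
-- def collect_and_build_task_aggregator(tasks):
--     # One pass of per-building resource counts, then emit rounds by index
--     # (round r contains every resource whose count exceeds r) instead of
--     # repeatedly decrementing the counts in a while-loop.
--     counts = {}
--     for t in tasks:
--         if t[0] == "collect":
--             per = counts.setdefault(t[2], {})
--             per[t[1]] = per.get(t[1], 0) + 1
--
--     if counts:
--         aggregated_tasks = [
--             [("collect", rt, b) for rt, c in res.items() if c > r] + [("build", b)]
--             for b, res in counts.items()
--             for r in range(max(res.values()))
--         ]
--     else:
--         aggregated_tasks = [[t] for t in tasks]
--
--     if len(aggregated_tasks) == 1 and len(aggregated_tasks[0]) > 2: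
--         aggregated_tasks = [[t, ("build", t[2])] for t in aggregated_tasks[0] if t[0] == "collect"]
--     return aggregated_tasks
-- ===== Notes on version B (the rewrite author's own statement) =====
-- stated objective: idiomatic
-- what changed: The while-loop that repeatedly decrements the per-building resource counts and the explicit append loops are replaced by immutable round-indexing: round r contains every resource whose original count exceeds r, emitted with comprehensions over range(max(counts)); the split blocks become comprehensions too.
import Mathlib
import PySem

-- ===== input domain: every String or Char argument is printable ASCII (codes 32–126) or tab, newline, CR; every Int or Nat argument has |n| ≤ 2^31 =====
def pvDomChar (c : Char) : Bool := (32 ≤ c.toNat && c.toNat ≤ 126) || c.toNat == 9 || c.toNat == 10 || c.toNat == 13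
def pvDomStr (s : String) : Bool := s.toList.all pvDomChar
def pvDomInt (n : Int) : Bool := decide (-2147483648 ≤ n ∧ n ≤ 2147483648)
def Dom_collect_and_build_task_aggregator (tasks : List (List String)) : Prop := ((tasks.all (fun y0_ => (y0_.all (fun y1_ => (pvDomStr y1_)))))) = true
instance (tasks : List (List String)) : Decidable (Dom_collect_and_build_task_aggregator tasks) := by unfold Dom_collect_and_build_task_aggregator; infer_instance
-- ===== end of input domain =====

-- B replaces A's count-decrementing while-loop by immutable round-indexing (round r keeps
-- the resources whose count exceeds r) and writes the output with comprehensions; same results.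

-- ===== PORT A =====
-- first pass: building_resources + collect_tasks_found flag
def pvStepA (st : PySem.Dict String (PySem.Dict String Int) × Bool) (task : List String) :
    PySem.Dict String (PySem.Dict String Int) × Bool :=
  if PySem.List.pyGetD task 0 "" = "collect" then
    let resource_type := PySem.List.pyGetD task 1 ""
    let building := PySem.List.pyGetD task 2 ""
    let br := st.1
    if br.contains building = false then
      (br.insert building (PySem.Dict.empty.insert resource_type 1), true)
    else
      let inner := br.getD building PySem.Dict.empty
      if inner.contains resource_type = false then
        (br.insert building (inner.insert resource_type 1), true)
      else
        (br.insert building (inner.insert resource_type (inner.getD resource_type 0 + 1)), true)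
  else st

-- the 'while any(building_resources[building].values())' loop (fuel makes it total;
-- the caller passes more fuel than the loop can ever run)
def pvWhileA (building : String) (inner : PySem.Dict String Int)
    (acc : List (List (List String))) : Nat → List (List (List String))
  | 0 => acc
  | fuel+1 =>
    if inner.values.any (fun c => c != 0) then
      let p := inner.items.foldl
        (fun (q : PySem.Dict String Int × List (List String)) kv =>
          if 0 < kv.2 then (q.1.insert kv.1 (kv.2 - 1), q.2 ++ [["collect", kv.1, building]])
          else q) (inner, [])
      pvWhileA building p.1 (acc ++ [p.2 ++ [["build", building]]]) fuel
    else acc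

def collect_and_build_task_aggregator (tasks : List (List String)) : List (List (List String)) :=
  let st := tasks.foldl pvStepA (PySem.Dict.empty, false)
  let aggregated_tasks :=
    if st.2 then
      st.1.keys.foldl (fun acc building =>
        let inner := st.1.getD building PySem.Dict.empty
        pvWhileA building inner acc ((inner.values.map Int.toNat).sum + 1)) []
    else
      tasks.foldl (fun acc task => acc ++ [[task]]) []
  if aggregated_tasks.length = 1 ∧ 2 < (aggregated_tasks.headD []).length then
    (aggregated_tasks.headD []).foldl (fun acc task =>
      if PySem.List.pyGetD task 0 "" = "collect" then
        acc ++ [[task, ["build", PySem.List.pyGetD task 2 ""]]]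
      else acc) []
  else aggregated_tasks

-- ===== PORT B =====
def pvStepB (counts : PySem.Dict String (PySem.Dict String Int)) (t : List String) :
    PySem.Dict String (PySem.Dict String Int) :=
  if PySem.List.pyGetD t 0 "" = "collect" then
    counts.modify (PySem.List.pyGetD t 2 "") PySem.Dict.empty
      (fun per => per.modify (PySem.List.pyGetD t 1 "") 0 (· + 1))
  else counts

-- the rounds of one building: round r collects every resource whose count exceeds r
def pvGroupsB (b : String) (res : PySem.Dict String Int) : List (List (List String)) :=
  (PySem.List.pyRange 0 ((PySem.List.max? res.values (fun v => v)).getD 0) 1).map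
    (fun r =>
      (res.items.filter (fun rc => decide (r < rc.2))).map (fun rc => ["collect", rc.1, b])
        ++ [["build", b]])

def collect_and_build_task_aggregator_alt (tasks : List (List String)) : List (List (List String)) :=
  let counts := tasks.foldl pvStepB PySem.Dict.empty
  let aggregated_tasks :=
    if counts.size ≠ 0 then
      counts.items.flatMap (fun bres => pvGroupsB bres.1 bres.2)
    else tasks.map (fun t => [t])
  if aggregated_tasks.length = 1 ∧ 2 < (aggregated_tasks.headD []).length then
    ((aggregated_tasks.headD []).filter (fun t => decide (PySem.List.pyGetD t 0 "" = "collect"))).map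
      (fun t => [t, ["build", PySem.List.pyGetD t 2 ""]])
  else aggregated_tasks

-- ===== PRECONDITION & SPEC =====
-- Pre_ excludes exactly the inputs where the Python raises IndexError: an empty task,
-- or a "collect" task with fewer than three fields.
def Pre_collect_and_build_task_aggregator (tasks : List (List String)) : Prop :=
  ∀ t ∈ tasks, t ≠ [] ∧ (t.headD "" = "collect" → 3 ≤ t.length)
instance (tasks : List (List String)) : Decidable (Pre_collect_and_build_task_aggregator tasks) := by
  unfold Pre_collect_and_build_task_aggregator; infer_instance
def pvWitness_collect_and_build_task_aggregator : List (List String) :=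
  [["collect", "wood", "house"], ["build", "house"]]

def Spec_collect_and_build_task_aggregator (tasks : List (List String)) (out : List (List (List String))) : Prop := out = collect_and_build_task_aggregator_alt tasks
instance (tasks : List (List String)) (out : List (List (List String))) : Decidable (Spec_collect_and_build_task_aggregator tasks out) := by unfold Spec_collect_and_build_task_aggregator; infer_instance

-- ===== CLAIM (what is proved, stated in full; the proofs are below) =====
def Claim_equal_collect_and_build_task_aggregator : Prop := ∀ (tasks : List (List String)), Dom_collect_and_build_task_aggregator tasks → Pre_collect_and_build_task_aggregator tasks → Spec_collect_and_build_task_aggregator tasks (collect_and_build_task_aggregator tasks)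

-- ===== LEMMAS AND PROOFS =====

-- the two counting steps build the same dictionary
lemma pv_stepA_fst (d : PySem.Dict String (PySem.Dict String Int)) (fl : Bool) (t : List String) :
    (pvStepA (d, fl) t).1 = pvStepB d t := by
  simp only [pvStepA, pvStepB, PySem.Dict.modify]
  by_cases hcoll : PySem.List.pyGetD t 0 "" = "collect"
  · simp only [if_pos hcoll]
    by_cases h1 : d.contains (PySem.List.pyGetD t 2 "") = false
    · simp only [if_pos h1, PySem.Dict.getD_of_not_contains _ _ h1, PySem.Dict.getD_empty]
      norm_num
    · simp only [if_neg h1]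
      by_cases h2 : (d.getD (PySem.List.pyGetD t 2 "") PySem.Dict.empty).contains (PySem.List.pyGetD t 1 "") = false
      · simp only [if_pos h2, PySem.Dict.getD_of_not_contains _ _ h2]
        norm_num
      · simp only [if_neg h2]
  · simp only [if_neg hcoll]

lemma pv_size_ne_zero {d : PySem.Dict String (PySem.Dict String Int)} {k : String}
    (h : d.contains k = true) : d.size ≠ 0 := by
  have : k ∈ d.keys := (PySem.Dict.contains_iff_mem_keys d k).mp h
  simp only [PySem.Dict.keys] at this
  rcases List.mem_map.mp this with ⟨p, hp, -⟩
  have : d.items ≠ [] := by rintro h0; rw [h0] at hp; simp at hp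
  simp only [PySem.Dict.size]
  exact fun hlen => this (List.eq_nil_of_length_eq_zero hlen)

lemma pv_stepA_pair (d : PySem.Dict String (PySem.Dict String Int)) (t : List String) :
    pvStepA (d, d.size != 0) t = (pvStepB d t, (pvStepB d t).size != 0) := by
  have hfst := pv_stepA_fst d (d.size != 0) t
  by_cases hcoll : PySem.List.pyGetD t 0 "" = "collect"
  · have hsz : (pvStepB d t).size ≠ 0 := by
      simp only [pvStepB, if_pos hcoll, PySem.Dict.modify, PySem.Dict.size_insert]
      by_cases hc : d.contains (PySem.List.pyGetD t 2 "") = true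
      · simp only [if_pos hc]; exact pv_size_ne_zero hc
      · simp only [if_neg hc]; omega
    have hsnd : (pvStepA (d, d.size != 0) t).2 = true := by
      simp only [pvStepA, if_pos hcoll]
      split
      · rfl
      · split <;> rfl
    refine Prod.ext hfst ?_
    rw [hsnd]; symm; simpa using hsz
  · have hA : pvStepA (d, d.size != 0) t = (d, d.size != 0) := by simp [pvStepA, hcoll]
    have hB : pvStepB d t = d := by simp [pvStepB, hcoll]
    rw [hA, hB]

lemma pv_count_fold (tasks : List (List String)) (d : PySem.Dict String (PySem.Dict String Int)) :
    tasks.foldl pvStepA (d, d.size != 0) =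
      (tasks.foldl pvStepB d, (tasks.foldl pvStepB d).size != 0) := by
  induction tasks generalizing d with
  | nil => rfl
  | cons t rest ih =>
    simp only [List.foldl_cons, pv_stepA_pair d t]
    exact ih (pvStepB d t)

-- a key that tests positive is in the items
lemma pv_mem_of_contains {κ ν : Type} [BEq κ] [LawfulBEq κ] (d : PySem.Dict κ ν) (k : κ)
    (dflt : ν) (hc : d.contains k = true) : (k, d.getD k dflt) ∈ d.items := by
  have h1 : (d.get? k).isSome := by rw [← PySem.Dict.contains_eq_isSome_get?]; exact hc
  rcases Option.isSome_iff_exists.mp h1 with ⟨v, hv⟩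
  have hmem := PySem.Dict.mem_items_of_get?_eq_some _ hv
  have hgd : d.getD k dflt = v := by rw [PySem.Dict.getD_eq_get?_getD, hv]; rfl
  rw [hgd]
  exact hmem

-- invariant of the counting dictionary: nodup keys everywhere, nonnegative counts
def pvInv (d : PySem.Dict String (PySem.Dict String Int)) : Prop :=
  d.keys.Nodup ∧ ∀ kv ∈ d.items, kv.2.keys.Nodup ∧ ∀ rc ∈ kv.2.items, (0:Int) ≤ rc.2

lemma pv_inv_step (d : PySem.Dict String (PySem.Dict String Int)) (t : List String)
    (h : pvInv d) : pvInv (pvStepB d t) := by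
  obtain ⟨hnd, hitems⟩ := h
  by_cases hcoll : PySem.List.pyGetD t 0 "" = "collect"
  · simp only [pvStepB, if_pos hcoll, PySem.Dict.modify]
    have hinnerInv : (d.getD (PySem.List.pyGetD t 2 "") PySem.Dict.empty).keys.Nodup ∧
        ∀ rc ∈ (d.getD (PySem.List.pyGetD t 2 "") PySem.Dict.empty).items, (0:Int) ≤ rc.2 := by
      by_cases hc : d.contains (PySem.List.pyGetD t 2 "") = true
      · exact hitems _ (pv_mem_of_contains d _ PySem.Dict.empty hc)
      · rw [PySem.Dict.getD_of_not_contains _ _ (by simpa using hc)]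
        exact ⟨by simp [PySem.Dict.keys, PySem.Dict.empty], by simp [PySem.Dict.empty]⟩
    set inner := d.getD (PySem.List.pyGetD t 2 "") PySem.Dict.empty with hinner
    have hx : (0:Int) ≤ inner.getD (PySem.List.pyGetD t 1 "") 0 := by
      by_cases hc2 : inner.contains (PySem.List.pyGetD t 1 "") = true
      · exact hinnerInv.2 _ (pv_mem_of_contains inner _ 0 hc2)
      · rw [PySem.Dict.getD_of_not_contains _ _ (by simpa using hc2)]
    constructor
    · exact PySem.Dict.nodup_keys_insert _ _ _ hnd
    · intro kv hkv
      rcases (PySem.Dict.mem_items_insert _ _ _ _).mp hkv with hkv | ⟨hkv, -⟩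
      · rw [hkv]
        refine ⟨PySem.Dict.nodup_keys_insert _ _ _ hinnerInv.1, ?_⟩
        intro rc hrc
        rcases (PySem.Dict.mem_items_insert _ _ _ _).mp hrc with hrc | ⟨hrc, -⟩
        · rw [hrc]; simp only []; omega
        · exact hinnerInv.2 _ hrc
      · exact hitems _ hkv
  · simpa [pvStepB, hcoll] using ⟨hnd, hitems⟩

lemma pv_inv_fold (tasks : List (List String)) :
    pvInv (tasks.foldl pvStepB PySem.Dict.empty) := by
  have hgen : ∀ (d : PySem.Dict String (PySem.Dict String Int)), pvInv d →
      pvInv (tasks.foldl pvStepB d) := by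
    induction tasks with
    | nil => exact fun d hd => hd
    | cons t rest ih => exact fun d hd => ih _ (pv_inv_step d t hd)
  exact hgen _ ⟨by simp [PySem.Dict.keys, PySem.Dict.empty], by simp [PySem.Dict.empty]⟩

-- one round of A's while-loop, on the items list
def pvDec (l : List (String × Int)) : List (String × Int) :=
  l.map (fun kv => if 0 < kv.2 then (kv.1, kv.2 - 1) else kv)

lemma pv_fst_dec (l : List (String × Int)) : (pvDec l).map (·.1) = l.map (·.1) := by
  simp only [pvDec, List.map_map]
  apply List.map_congr_left; intro kv _; by_cases h : 0 < kv.2 <;> simp [h]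

lemma pv_snd_dec (l : List (String × Int)) :
    (pvDec l).map (·.2) = (l.map (·.2)).map (fun v => if 0 < v then v - 1 else v) := by
  simp only [pvDec, List.map_map]
  apply List.map_congr_left; intro kv _; by_cases h : 0 < kv.2 <;> simp [h]

lemma pv_roundA_spec (building : String) (l : List (String × Int)) :
    ∀ (pre : List (String × Int)) (d : PySem.Dict String Int) (acc : List (List String)),
    d.items = pre ++ l → d.keys.Nodup →
    l.foldl (fun (q : PySem.Dict String Int × List (List String)) kv =>
        if 0 < kv.2 then (q.1.insert kv.1 (kv.2 - 1), q.2 ++ [["collect", kv.1, building]])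
        else q) (d, acc)
      = (⟨pre ++ pvDec l⟩,
         acc ++ (l.filter (fun kv => decide (0 < kv.2))).map
           (fun kv => ["collect", kv.1, building])) := by
  induction l with
  | nil =>
    intro pre d acc hit hnd
    simp only [List.foldl_nil, pvDec, List.map_nil, List.append_nil, List.filter_nil]
    exact Prod.ext (PySem.Dict.ext (by simpa using hit)) (by simp)
  | cons kv rest ih =>
    intro pre d acc hit hnd
    have hmem : kv ∈ d.items := by rw [hit]; simp
    have hc : d.contains kv.1 = true := by
      rw [PySem.Dict.contains_iff_mem_keys]
      simp only [PySem.Dict.keys]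
      exact List.mem_map.mpr ⟨kv, hmem, rfl⟩
    have hkeys : d.keys = pre.map (·.1) ++ kv.1 :: rest.map (·.1) := by
      simp only [PySem.Dict.keys, hit, List.map_append, List.map_cons]
    rw [hkeys] at hnd
    have hnot : kv.1 ∉ pre.map (·.1) ∧ kv.1 ∉ rest.map (·.1) := by
      rw [List.nodup_append] at hnd
      obtain ⟨-, hnd2, hdisj⟩ := hnd
      refine ⟨fun hm => hdisj _ hm _ (by simp) rfl, ?_⟩
      exact (List.nodup_cons.mp hnd2).1
    have hnotpre : ∀ p ∈ pre, ¬ p.1 = kv.1 := by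
      intro p hp heq
      exact hnot.1 (List.mem_map.mpr ⟨p, hp, heq⟩)
    have hnotrest : ∀ p ∈ rest, ¬ p.1 = kv.1 := by
      intro p hp heq
      exact hnot.2 (List.mem_map.mpr ⟨p, hp, heq⟩)
    by_cases h : 0 < kv.2
    · have hit' : (d.insert kv.1 (kv.2 - 1)).items = (pre ++ [(kv.1, kv.2 - 1)]) ++ rest := by
        rw [PySem.Dict.items_insert_of_contains d _ hc, hit]
        rw [List.map_append, List.map_cons]
        have h1 : pre.map (fun p => if (p.1 == kv.1) = true then (kv.1, kv.2 - 1) else p) = pre := by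
          rw [List.map_congr_left (g := id) ?_, List.map_id]
          intro p hp; simp [hnotpre p hp]
        have h2 : rest.map (fun p => if (p.1 == kv.1) = true then (kv.1, kv.2 - 1) else p) = rest := by
          rw [List.map_congr_left (g := id) ?_, List.map_id]
          intro p hp; simp [hnotrest p hp]
        rw [h1, h2]
        simp
      have hnd' : (d.insert kv.1 (kv.2 - 1)).keys.Nodup := by
        apply PySem.Dict.nodup_keys_insert
        rw [hkeys]; exact hnd
      have := ih (pre ++ [(kv.1, kv.2 - 1)]) (d.insert kv.1 (kv.2 - 1))
        (acc ++ [["collect", kv.1, building]]) hit' hnd'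
      simp only [List.foldl_cons, if_pos h]
      rw [this]
      rw [List.filter_cons_of_pos (by simpa using h)]
      simp [pvDec, h, List.append_assoc]
    · have := ih (pre ++ [kv]) d acc (by rw [hit]; simp) (by rw [hkeys]; exact hnd)
      simp only [List.foldl_cons, if_neg h]
      rw [this]
      rw [List.filter_cons_of_neg (by simpa using h)]
      simp [pvDec, h, List.append_assoc]

-- max of a value list, as B computes it
def pvMx (vs : List Int) : Int := (PySem.List.max? vs (fun v => v)).getD 0

lemma pv_groupsB_eq (b : String) (res : PySem.Dict String Int) :
    pvGroupsB b res = (PySem.List.pyRange 0 (pvMx res.values) 1).map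
      (fun r => (res.items.filter (fun rc => decide (r < rc.2))).map
          (fun rc => ["collect", rc.1, b]) ++ [["build", b]]) := rfl

lemma pv_mx_mem {vs : List Int} (h : vs ≠ []) : pvMx vs ∈ vs := by
  unfold pvMx
  rcases hm : PySem.List.max? vs (fun v => v) with _ | m
  · exact absurd ((PySem.List.max?_eq_none_iff _ _).mp hm) h
  · simpa using PySem.List.max?_mem hm

lemma pv_mx_ub {vs : List Int} {v : Int} (hv : v ∈ vs) : v ≤ pvMx vs := by
  unfold pvMx
  rcases hm : PySem.List.max? vs (fun v => v) with _ | m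
  · rw [PySem.List.max?_eq_none_iff] at hm; simp [hm] at hv
  · simpa using PySem.List.max?_isMax hm v hv

lemma pv_mx_zero {vs : List Int} (h : ∀ v ∈ vs, v = 0) : pvMx vs = 0 := by
  rcases eq_or_ne vs [] with rfl | hne
  · rfl
  · exact h _ (pv_mx_mem hne)

lemma pv_mx_pos {vs : List Int} {v : Int} (hv : v ∈ vs) (h : 0 < v) : 0 < pvMx vs :=
  lt_of_lt_of_le h (pv_mx_ub hv)

lemma pv_mx_dec {vs : List Int} (hn : ∀ v ∈ vs, 0 ≤ v) (hp : 0 < pvMx vs) :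
    pvMx (vs.map (fun v => if 0 < v then v - 1 else v)) = pvMx vs - 1 := by
  have hne : vs ≠ [] := by rintro rfl; simp [pvMx, PySem.List.max?] at hp
  have hmem := pv_mx_mem hne
  have hmem' : pvMx vs - 1 ∈ vs.map (fun v => if 0 < v then v - 1 else v) :=
    List.mem_map.mpr ⟨pvMx vs, hmem, by simp [hp]⟩
  have hub : ∀ w ∈ vs.map (fun v => if 0 < v then v - 1 else v), w ≤ pvMx vs - 1 := by
    intro w hw
    rcases List.mem_map.mp hw with ⟨v, hv, rfl⟩
    have := pv_mx_ub hv; have := hn v hv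
    by_cases h : 0 < v <;> simp [h] <;> omega
  have h1 := pv_mx_ub hmem'
  have h2 := hub _ (pv_mx_mem (by rintro h0; rw [h0] at hmem'; simp at hmem'))
  omega

lemma pv_mx_le_sum {vs : List Int} : (pvMx vs).toNat ≤ (vs.map Int.toNat).sum := by
  rcases eq_or_ne vs [] with rfl | hne
  · simp [pvMx, PySem.List.max?]
  · have hmem : (pvMx vs).toNat ∈ vs.map Int.toNat := List.mem_map.mpr ⟨_, pv_mx_mem hne, rfl⟩
    exact List.single_le_sum (fun x _ => Nat.zero_le x) _ hmem

lemma pv_range_shift (M : Int) :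
    PySem.List.pyRange 1 M 1 = (PySem.List.pyRange 0 (M - 1) 1).map (· + 1) := by
  rw [PySem.List.pyRange_one, PySem.List.pyRange_one, List.map_map]
  have h : (M - 1 : Int) - 0 = M - 1 := by ring
  rw [h]
  apply List.map_congr_left; intro k _; simp; omega

lemma pv_filter_dec (b : String) (r : Int) (l : List (String × Int))
    (hn : ∀ kv ∈ l, (0:Int) ≤ kv.2) (hr : 0 ≤ r) :
    ((pvDec l).filter (fun rc => decide (r < rc.2))).map (fun rc => ["collect", rc.1, b])
      = (l.filter (fun rc => decide (r + 1 < rc.2))).map (fun rc => ["collect", rc.1, b]) := by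
  induction l with
  | nil => rfl
  | cons kv rest ih =>
    have hkv := hn kv (by simp)
    have ih' := ih (fun x hx => hn x (by simp [hx]))
    by_cases h : 0 < kv.2
    · by_cases h2 : r + 1 < kv.2
      · simp only [pvDec, List.map_cons, if_pos h]
        rw [List.filter_cons_of_pos (by simp; omega), List.filter_cons_of_pos (by simp; omega)]
        simp only [List.map_cons]
        exact congrArg _ ih'
      · simp only [pvDec, List.map_cons, if_pos h]
        rw [List.filter_cons_of_neg (by simp; omega), List.filter_cons_of_neg (by simp; omega)]
        exact ih'
    · simp only [pvDec, List.map_cons, if_neg h]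
      rw [List.filter_cons_of_neg (by simp; omega), List.filter_cons_of_neg (by simp; omega)]
      exact ih'

lemma pv_whileA_spec (b : String) (fuel : Nat) :
    ∀ (inner : PySem.Dict String Int) (acc : List (List (List String))),
    inner.keys.Nodup → (∀ kv ∈ inner.items, (0:Int) ≤ kv.2) →
    (pvMx inner.values).toNat < fuel →
    pvWhileA b inner acc fuel = acc ++ pvGroupsB b inner := by
  induction fuel with
  | zero => intro inner acc _ _ hf; omega
  | succ n ih =>
    intro inner acc hnd hn hf
    have hvals : inner.values = inner.items.map (·.2) := rfl
    have hvals_nonneg : ∀ v ∈ inner.values, (0:Int) ≤ v := by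
      intro v hv
      rw [hvals] at hv
      rcases List.mem_map.mp hv with ⟨kv, hkv, rfl⟩
      exact hn kv hkv
    by_cases hAny : inner.values.any (fun c => c != 0) = true
    · obtain ⟨c, hc, hc0⟩ : ∃ c ∈ inner.values, c ≠ 0 := by simpa using hAny
      have hpos : 0 < pvMx inner.values :=
        pv_mx_pos hc (lt_of_le_of_ne (hvals_nonneg c hc) (Ne.symm hc0))
      have hround := pv_roundA_spec b inner.items [] inner [] rfl hnd
      simp only [pvWhileA, if_pos hAny, hround]
      simp only [List.nil_append]
      set inner' : PySem.Dict String Int := ⟨pvDec inner.items⟩ with hinner'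
      have hit' : inner'.items = pvDec inner.items := rfl
      have hnd' : inner'.keys.Nodup := by
        have : inner'.keys = inner.keys := by
          simp only [PySem.Dict.keys, hit', pv_fst_dec]
        rw [this]; exact hnd
      have hn' : ∀ kv ∈ inner'.items, (0:Int) ≤ kv.2 := by
        intro kv hkv
        rw [hit'] at hkv
        rcases List.mem_map.mp hkv with ⟨kv0, hkv0, rfl⟩
        have := hn kv0 hkv0
        by_cases h0 : 0 < kv0.2 <;> simp [h0] <;> omega
      have hmx' : pvMx inner'.values = pvMx inner.values - 1 := by
        have hv' : inner'.values = (inner.values).map (fun v => if 0 < v then v - 1 else v) := by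
          have h0 : inner'.values = inner'.items.map (·.2) := rfl
          rw [h0, hit', pv_snd_dec, ← hvals]
        rw [hv']
        exact pv_mx_dec hvals_nonneg hpos
      have hf' : (pvMx inner'.values).toNat < n := by rw [hmx']; omega
      rw [ih inner' _ hnd' hn' hf']
      rw [pv_groupsB_eq, pv_groupsB_eq, hmx']
      rw [PySem.List.pyRange_one_cons hpos, List.map_cons]
      simp only [zero_add]
      rw [pv_range_shift (pvMx inner.values), List.map_map]
      have htail : ∀ r ∈ PySem.List.pyRange 0 (pvMx inner.values - 1) 1,
          ((inner.items.filter (fun rc => decide (r + 1 < rc.2))).map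
              (fun rc => ["collect", rc.1, b]) ++ [["build", b]])
            = ((inner'.items.filter (fun rc => decide (r < rc.2))).map
              (fun rc => ["collect", rc.1, b]) ++ [["build", b]]) := by
        intro r hr
        have hr0 : 0 ≤ r := (PySem.List.mem_pyRange_one.mp hr).1
        rw [hit', pv_filter_dec b r inner.items hn hr0]
      rw [List.map_congr_left (fun r hr => (htail r hr).symm)]
      simp [List.append_assoc]
    · have hzero : ∀ v ∈ inner.values, v = 0 := by
        intro v hv
        by_contra hne
        have h' : ¬ ∃ c ∈ inner.values, c ≠ 0 := by simpa using hAny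
        exact h' ⟨v, hv, hne⟩
      have hmx0 : pvMx inner.values = 0 := pv_mx_zero hzero
      simp only [pvWhileA, if_neg hAny]
      rw [pv_groupsB_eq, hmx0, PySem.List.pyRange_one_eq_nil (by omega)]
      simp

-- the final len==1 / len>2 split, A's fold vs B's filter+map
lemma pv_split_eq (agg : List (List (List String))) :
    (if agg.length = 1 ∧ 2 < (agg.headD []).length then
      (agg.headD []).foldl (fun acc task =>
        if PySem.List.pyGetD task 0 "" = "collect" then
          acc ++ [[task, ["build", PySem.List.pyGetD task 2 ""]]] else acc) []
     else agg)
    = (if agg.length = 1 ∧ 2 < (agg.headD []).length then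
      ((agg.headD []).filter (fun t => decide (PySem.List.pyGetD t 0 "" = "collect"))).map
        (fun t => [t, ["build", PySem.List.pyGetD t 2 ""]])
     else agg) := by
  split
  · rw [PySem.List.foldl_append_ite]
    simp
  · rfl

lemma pv_agg_eq (tasks : List (List String)) :
    collect_and_build_task_aggregator tasks = collect_and_build_task_aggregator_alt tasks := by
  simp only [collect_and_build_task_aggregator, collect_and_build_task_aggregator_alt]
  have hcnt : tasks.foldl pvStepA (PySem.Dict.empty, false) =
      (tasks.foldl pvStepB PySem.Dict.empty, (tasks.foldl pvStepB PySem.Dict.empty).size != 0) :=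
    pv_count_fold tasks PySem.Dict.empty
  rw [hcnt]
  obtain ⟨hCnd, hCitems⟩ := pv_inv_fold tasks
  set C := tasks.foldl pvStepB PySem.Dict.empty with hC
  by_cases hsz : C.size = 0
  · have h2 : (C.size != 0) = false := by simp [hsz]
    rw [h2]
    simp only [Bool.false_eq_true, if_false, if_neg (by omega : ¬ C.size ≠ 0)]
    rw [PySem.List.foldl_append_singleton_eq_map (f := fun (task : List String) => [task])]
    rw [List.nil_append]
    exact pv_split_eq _
  · have h2 : (C.size != 0) = true := by simp [hsz]
    rw [h2]
    simp only [if_true, if_pos (by omega : C.size ≠ 0)]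
    have haggs : C.keys.foldl (fun acc building =>
        pvWhileA building (C.getD building PySem.Dict.empty) acc
          (((C.getD building PySem.Dict.empty).values.map Int.toNat).sum + 1)) []
        = C.items.flatMap (fun bres => pvGroupsB bres.1 bres.2) := by
      have h1 : ∀ (acc : List (List (List String))) (b : String), b ∈ C.keys →
          pvWhileA b (C.getD b PySem.Dict.empty) acc
            (((C.getD b PySem.Dict.empty).values.map Int.toNat).sum + 1)
          = acc ++ pvGroupsB b (C.getD b PySem.Dict.empty) := by
        intro acc b hb
        have hcont : C.contains b = true := (PySem.Dict.contains_iff_mem_keys C b).mpr hb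
        obtain ⟨hnd, hnn⟩ := hCitems _ (pv_mem_of_contains C b PySem.Dict.empty hcont)
        dsimp only at hnd hnn
        apply pv_whileA_spec b _ _ _ hnd hnn
        have := pv_mx_le_sum (vs := (C.getD b PySem.Dict.empty).values)
        omega
      rw [PySem.List.foldl_congr_mem C.keys _
        (fun acc b => acc ++ pvGroupsB b (C.getD b PySem.Dict.empty)) [] h1]
      rw [PySem.List.foldl_append_eq_flatMap, List.nil_append]
      rw [PySem.Dict.items_eq_map_keys C hCnd PySem.Dict.empty]
      rw [List.flatMap_map]
    rw [haggs]
    exact pv_split_eq _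

-- ===== VERDICT (by name: the statement is the Claim_ definition above) =====
theorem collect_and_build_task_aggregator_spec : Claim_equal_collect_and_build_task_aggregator :=
  fun tasks _ _ => pv_agg_eq tasks
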